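-- pv_equiv track=rewrite | github.com/Dormailler/Algorithm | 프로그래머스/unrated/181890. 왼쪽 오른쪽/왼쪽 오른쪽.py | solution
-- ===== SOURCE A (Python) =====
-- def solution(str_list):
--     a = []
--     for i in range(len(str_list)):
--         if str_list[i] == "l":
--             return a
--         if str_list[i] == "r":
--             return str_list[i+1:]
--         a.append(str_list[i])
--     return []
-- ===== SOURCE B (Python) =====
-- def solution(str_list):
--     n = len(str_list)
--     li = str_list.index("l") if "l" in str_list else n
--     ri = str_list.index("r") if "r" in str_list else n
--     if li == ri:
--         return []
--     return str_list[:li] if li < ri else str_list[ri+1:]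
-- ===== Notes on version B (the rewrite author's own statement) =====
-- stated objective: simpler
-- what changed: Replaces the stateful accumulate-and-early-return scan with locating the first 'l' and first 'r' indices (list.index) and returning a single slice.
import Mathlib
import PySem

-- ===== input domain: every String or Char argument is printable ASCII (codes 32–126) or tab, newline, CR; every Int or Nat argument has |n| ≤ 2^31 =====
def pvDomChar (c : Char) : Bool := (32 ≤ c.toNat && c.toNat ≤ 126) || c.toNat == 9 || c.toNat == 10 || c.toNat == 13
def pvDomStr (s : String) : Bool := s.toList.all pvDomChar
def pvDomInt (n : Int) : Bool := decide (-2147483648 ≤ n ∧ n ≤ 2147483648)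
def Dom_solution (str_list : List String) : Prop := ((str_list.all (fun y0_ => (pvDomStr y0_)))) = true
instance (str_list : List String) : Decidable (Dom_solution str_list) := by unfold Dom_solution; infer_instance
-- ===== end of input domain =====

-- B replaces A's stateful accumulate-and-early-return scan by locating the first "l" and "r" and returning one slice (objective: simpler).


-- ===== PORT A =====
-- the index loop with early returns, as structural recursion over the remaining list,
-- carrying the accumulator a (a.append x = a ++ [x]); str_list[i+1:] is the tail xs
def solutionGo (rest : List String) (a : List String) : List String :=
  match rest with
  | [] => []
  | x :: xs =>
    if x = "l" then a
    else if x = "r" then xs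
    else solutionGo xs (a ++ [x])

def solution (str_list : List String) : List String := solutionGo str_list []

-- ===== PORT B =====
-- li/ri: index of first "l"/"r", or len if absent; str_list[:li] / str_list[ri+1:]
-- are take/drop — exact for these nonnegative in-range indices
def solution_alt (str_list : List String) : List String :=
  let n := str_list.length
  let li := (PySem.List.index? str_list "l").getD n
  let ri := (PySem.List.index? str_list "r").getD n
  if li = ri then []
  else if li < ri then str_list.take li
  else str_list.drop (ri + 1)

-- ===== PRECONDITION & SPEC =====
def Spec_solution (str_list : List String) (out : List String) : Prop := out = solution_alt str_list
instance (str_list : List String) (out : List String) : Decidable (Spec_solution str_list out) := by unfold Spec_solution; infer_instance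

-- ===== CLAIM (what is proved, stated in full; the proofs are below) =====
def Claim_equal_solution : Prop := ∀ (str_list : List String), Dom_solution str_list → Spec_solution str_list (solution str_list)

-- ===== LEMMAS AND PROOFS =====
theorem solutionGo_eq (rest : List String) : ∀ (a : List String),
    solutionGo rest a =
      (let n := rest.length
       let li := (PySem.List.index? rest "l").getD n
       let ri := (PySem.List.index? rest "r").getD n
       if li = ri then []
       else if li < ri then a ++ rest.take li
       else rest.drop (ri + 1)) := by
  induction rest with
  | nil => intro a; simp [solutionGo]
  | cons x xs ih =>
    intro a
    by_cases hl : x = "l"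
    · subst hl
      have hr : ("l" : String) ≠ "r" := by decide
      rw [PySem.List.index?_cons_of_ne xs hr]
      simp only [solutionGo, PySem.List.index?_cons_self, if_pos rfl]
      cases h : PySem.List.index? xs "r" with
      | none =>
        simp
      | some k =>
        simp [h]
    · by_cases hr : x = "r"
      · subst hr
        have hl' : ("r" : String) ≠ "l" := by decide
        rw [PySem.List.index?_cons_of_ne xs hl']
        simp only [solutionGo, PySem.List.index?_cons_self, if_neg (by decide : ¬("r":String) = "l"), if_pos rfl]
        cases h : PySem.List.index? xs "l" with
        | none => simp
        | some k => simp [h, Nat.lt_irrefl]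
      · have hl' : x ≠ "l" := hl
        have hr' : x ≠ "r" := hr
        rw [PySem.List.index?_cons_of_ne xs hl', PySem.List.index?_cons_of_ne xs hr']
        simp only [solutionGo, if_neg hl', if_neg hr', ih (a ++ [x])]
        cases h1 : PySem.List.index? xs "l" with
        | none =>
          cases h2 : PySem.List.index? xs "r" with
          | none => simp
          | some k =>
            have hk : k < xs.length := by
              obtain ⟨hk, _, _⟩ := PySem.List.getElem_of_index?_eq_some h2
              exact hk
            simp only [Option.map_some, Option.getD_some, Option.map_none, Option.getD_none,
              List.length_cons]
            rw [if_neg (by omega), if_neg (by omega), if_neg (by omega), if_neg (by omega)]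
            simp [List.drop]
        | some j =>
          cases h2 : PySem.List.index? xs "r" with
          | none =>
            have hj : j < xs.length := by
              obtain ⟨hj, _, _⟩ := PySem.List.getElem_of_index?_eq_some h1
              exact hj
            simp only [Option.map_some, Option.getD_some, Option.map_none, Option.getD_none,
              List.length_cons]
            rw [if_neg (by omega), if_pos (by omega), if_neg (by omega), if_pos (by omega)]
            simp
          | some k =>
            simp only [Option.map_some, Option.getD_some]
            by_cases he : j = k
            · subst he
              simp
            · have hne1 : ¬(j + 1 = k + 1) := by omega
              rw [if_neg hne1, if_neg he]
              by_cases hlt : j < k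
              · have hlt1 : j + 1 < k + 1 := by omega
                rw [if_pos hlt1, if_pos hlt]
                simp
              · have hlt1 : ¬(j + 1 < k + 1) := by omega
                rw [if_neg hlt1, if_neg hlt]
                simp [List.drop]

-- ===== VERDICT (by name: the statement is the Claim_ definition above) =====
theorem solution_spec : Claim_equal_solution := by
  intro str_list _
  unfold Spec_solution solution solution_alt
  rw [solutionGo_eq]
  simp
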